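-- pv_equiv track=rewrite | github.com/jefmud/render_boilerplate | minimus/minimus.py | _prune_headers
-- ===== SOURCE A (Python) =====
-- def _prune_headers(headers):
--     """_prune_headers() - remove headers that are duplicate
--     internal function, who would want to use it?
--     """
--     pruned_headers = []
--     headlen = len(headers)
--     header_count = {}
--     for i in range(headlen):
--         header = headers[headlen-i-1]
--         header_type = header[0].lower()
--         if header_type in ['content-type', 'content-length', 'content-encoding', 'content-language', 'content-location', 'content-md5', 'content-range', 'content-type', 'expires', 'last-modified', 'set-cookie', 'cache-control', 'pragma']:
--             header_count[header_type] = header_count.get(header_type, 0) + 1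
--             if header_count[header_type] <= 1:
--                 pruned_headers.append(header)
--         else:
--             pruned_headers.append(header)
--
--     return pruned_headers
-- ===== SOURCE B (Python) =====
-- _SPECIAL = {'content-type', 'content-length', 'content-encoding', 'content-language',
--             'content-location', 'content-md5', 'content-range', 'expires',
--             'last-modified', 'set-cookie', 'cache-control', 'pragma'}
--
-- def _prune_headers(headers):
--     """Two-pass rewrite: record the last index of each special header type,
--     then walk the indices backwards keeping non-special headers and only the
--     last occurrence of each special type."""
--     last = {}
--     for i, header in enumerate(headers):
--         t = header[0].lower()
--         if t in _SPECIAL: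
--             last[t] = i
--     result = []
--     for i in range(len(headers) - 1, -1, -1):
--         t = headers[i][0].lower()
--         if t not in _SPECIAL or last[t] == i:
--             result.append(headers[i])
--     return result
-- ===== Notes on version B (the rewrite author's own statement) =====
-- stated objective: alternative
-- what changed: Replaces the single reverse-order pass with a running occurrence-counter dict by two stateless-output passes: a forward pass recording the last index of each special header type, then a backward pass keeping a header iff it is non-special or sits at its type's recorded last index.
import Mathlib
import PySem

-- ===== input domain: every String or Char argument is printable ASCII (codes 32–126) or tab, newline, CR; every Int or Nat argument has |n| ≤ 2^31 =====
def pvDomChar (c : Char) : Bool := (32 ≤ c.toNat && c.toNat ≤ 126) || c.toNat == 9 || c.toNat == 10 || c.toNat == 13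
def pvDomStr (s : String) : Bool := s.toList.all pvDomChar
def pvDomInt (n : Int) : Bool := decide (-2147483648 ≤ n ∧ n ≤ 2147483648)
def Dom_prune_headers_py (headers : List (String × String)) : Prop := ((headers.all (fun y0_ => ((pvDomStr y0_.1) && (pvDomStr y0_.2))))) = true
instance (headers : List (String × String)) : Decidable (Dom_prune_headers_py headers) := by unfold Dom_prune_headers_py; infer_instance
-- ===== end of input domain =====

-- B replaces A's reverse pass with a running counter-dict by two passes: record each special
-- type's last index forward, then keep, walking backward, non-special headers and the header at
-- that last index (alternative decomposition; same O(n) cost).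


-- ===== PORT A =====
-- A's special-type list, literally (note the duplicated "content-type", as in the source)
def pvSpecialA : List String :=
  ["content-type", "content-length", "content-encoding", "content-language", "content-location",
   "content-md5", "content-range", "content-type", "expires", "last-modified", "set-cookie",
   "cache-control", "pragma"]

def prune_headers_py (headers : List (String × String)) : List (String × String) :=
  let headlen : Int := (headers.length : Int)
  -- for i in range(headlen): header = headers[headlen-i-1] — index always in range, so pyGetD is exact
  let st := (PySem.List.pyRange 0 headlen 1).foldl
    (fun (st : List (String × String) × PySem.Dict String Int) i =>
      let header := PySem.List.pyGetD headers (headlen - i - 1) ("", "")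
      let header_type := PySem.Str.lower header.1
      if header_type ∈ pvSpecialA then
        let hc := st.2.insert header_type (st.2.getD header_type 0 + 1)
        if hc.getD header_type 0 ≤ 1 then (st.1 ++ [header], hc) else (st.1, hc)
      else (st.1 ++ [header], st.2))
    ([], PySem.Dict.empty)
  st.1

-- ===== PORT B =====
-- B's special-type set (12 distinct entries)
def pvSpecialB : List String :=
  ["content-type", "content-length", "content-encoding", "content-language", "content-location",
   "content-md5", "content-range", "expires", "last-modified", "set-cookie", "cache-control",
   "pragma"]

def prune_headers_py_alt (headers : List (String × String)) : List (String × String) :=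
  -- first pass: last index of each special type
  let last := (PySem.List.enumerate headers 0).foldl
    (fun (d : PySem.Dict String Int) p =>
      let t := PySem.Str.lower p.2.1
      if t ∈ pvSpecialB then d.insert t p.1 else d)
    PySem.Dict.empty
  -- second pass: for i in range(len(headers)-1, -1, -1); last[t] is only read when t is special,
  -- and then t occurs at index i, so the key is present — getD's default -1 is never returned
  (PySem.List.pyRange ((headers.length : Int) - 1) (-1) (-1)).foldl
    (fun acc i =>
      let t := PySem.Str.lower (PySem.List.pyGetD headers i ("", "")).1
      if t ∉ pvSpecialB ∨ last.getD t (-1) = i then acc ++ [PySem.List.pyGetD headers i ("", "")]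
      else acc)
    []

-- ===== PRECONDITION & SPEC =====
def Spec_prune_headers_py (headers : List (String × String)) (out : List (String × String)) : Prop := out = prune_headers_py_alt headers
instance (headers : List (String × String)) (out : List (String × String)) : Decidable (Spec_prune_headers_py headers out) := by unfold Spec_prune_headers_py; infer_instance

-- ===== CLAIM (what is proved, stated in full; the proofs are below) =====
def Claim_equal_prune_headers_py : Prop := ∀ (headers : List (String × String)), Dom_prune_headers_py headers → Spec_prune_headers_py headers (prune_headers_py headers)

-- ===== LEMMAS AND PROOFS =====

-- membership ignores a duplicated element
theorem mem_dup {α : Type} (l1 l2 : List α) (a : α) (ha : a ∈ l1) (t : α) :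
    t ∈ l1 ++ a :: l2 ↔ t ∈ l1 ++ l2 := by
  simp only [List.mem_append, List.mem_cons]
  constructor
  · rintro (h | rfl | h)
    · exact Or.inl h
    · exact Or.inl ha
    · exact Or.inr h
  · rintro (h | h)
    · exact Or.inl h
    · exact Or.inr (Or.inr h)

-- the two membership tests agree (A's list merely repeats "content-type")
theorem mem_specialAB (t : String) : t ∈ pvSpecialA ↔ t ∈ pvSpecialB := by
  have hA : pvSpecialA =
      ["content-type", "content-length", "content-encoding", "content-language",
       "content-location", "content-md5", "content-range"] ++ "content-type" ::
      ["expires", "last-modified", "set-cookie", "cache-control", "pragma"] := rfl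
  have hB : pvSpecialB =
      ["content-type", "content-length", "content-encoding", "content-language",
       "content-location", "content-md5", "content-range"] ++
      ["expires", "last-modified", "set-cookie", "cache-control", "pragma"] := rfl
  rw [hA, hB]
  exact mem_dup _ _ _ (List.mem_cons_self) t

-- reference recursion: walk the reversed header list, dropping special types already seen
def pruneAux : List (String × String) → List String → List (String × String)
  | [], _ => []
  | h :: rest, seen =>
    if PySem.Str.lower h.1 ∈ pvSpecialB ∧ PySem.Str.lower h.1 ∈ seen then pruneAux rest seen
    else h :: pruneAux rest (PySem.Str.lower h.1 :: seen)

-- descending index list, rewritten structurally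
theorem desc_map_succ (m : ℕ) :
    (List.range (m + 1)).map (fun k : ℕ => ((m + 1 : ℕ) : Int) - 1 - k)
      = ((m : ℕ) : Int) :: (List.range m).map (fun k : ℕ => ((m : ℕ) : Int) - 1 - k) := by
  rw [List.range_succ_eq_map, List.map_cons, List.map_map]
  refine congrArg₂ _ (by omega) (List.map_congr_left ?_)
  intro k _; simp [Function.comp]; omega


-- A's step, on the header element itself
def stepA (st : List (String × String) × PySem.Dict String Int) (header : String × String) :
    List (String × String) × PySem.Dict String Int :=
  let header_type := PySem.Str.lower header.1
  if header_type ∈ pvSpecialA then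
    let hc := st.2.insert header_type (st.2.getD header_type 0 + 1)
    if hc.getD header_type 0 ≤ 1 then (st.1 ++ [header], hc) else (st.1, hc)
  else (st.1 ++ [header], st.2)

-- the indices headlen-i-1, i in range(headlen), fetch exactly the reversed list
theorem A_map_rev (xs : List (String × String)) (d : String × String) :
    (PySem.List.pyRange 0 (xs.length : Int) 1).map
      (fun i => PySem.List.pyGetD xs ((xs.length : Int) - i - 1) d) = xs.reverse := by
  rw [PySem.List.pyRange_zero_nat, List.map_map]
  apply List.ext_getElem
  · simp
  · intro j h1 h2
    simp only [List.getElem_map, List.getElem_range, Function.comp]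
    have hj : j < xs.length := by simpa using h1
    have hc : (xs.length : Int) - (j : ℕ) - 1 = ((xs.length - 1 - j : ℕ) : Int) := by omega
    rw [hc, PySem.List.pyGetD_natCast, List.getD_eq_getElem xs d (by omega), List.getElem_reverse]

theorem A_eq_foldr (xs : List (String × String)) :
    prune_headers_py xs = (xs.reverse.foldl stepA ([], PySem.Dict.empty)).1 := by
  rw [← A_map_rev xs ("", ""), List.foldl_map]
  rfl

-- invariant tying A's counter dict to the set of already-seen special types
def InvA (d : PySem.Dict String Int) (seen : List String) : Prop :=
  ∀ t ∈ pvSpecialB, 0 ≤ d.getD t 0 ∧ (d.getD t 0 = 0 ↔ t ∉ seen)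

theorem A_fold (l : List (String × String)) : ∀ acc d seen, InvA d seen →
    (l.foldl stepA (acc, d)).1 = acc ++ pruneAux l seen := by
  induction l with
  | nil => intro acc d seen _; simp [pruneAux]
  | cons h rest ih =>
    intro acc d seen hinv
    rw [List.foldl_cons]
    by_cases hs : PySem.Str.lower h.1 ∈ pvSpecialB
    · have hsA : PySem.Str.lower h.1 ∈ pvSpecialA := (mem_specialAB _).mpr hs
      obtain ⟨h0, h1⟩ := hinv _ hs
      by_cases hseen : PySem.Str.lower h.1 ∈ seen
      · -- already seen: count positive, header dropped
        have hne : ¬ d.getD (PySem.Str.lower h.1) 0 = 0 := fun hz => (h1.mp hz) hseen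
        have hstep : stepA (acc, d) h =
            (acc, d.insert (PySem.Str.lower h.1) (d.getD (PySem.Str.lower h.1) 0 + 1)) := by
          simp only [stepA, if_pos hsA, PySem.Dict.getD_insert]
          have : ¬ (d.getD (PySem.Str.lower h.1) 0 + 1 ≤ 1) := by omega
          simp [this]
        rw [hstep, ih _ _ seen ?_, pruneAux, if_pos (⟨hs, hseen⟩ : _ ∧ _)]
        intro t htB
        obtain ⟨g0, g1⟩ := hinv t htB
        rw [PySem.Dict.getD_insert]
        split_ifs with he
        · subst he
          refine ⟨by omega, by constructor <;> intro hx <;> [omega; tauto]⟩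
        · exact ⟨g0, g1⟩
      · -- first (reverse-order) occurrence: count was 0, header kept
        have hz : d.getD (PySem.Str.lower h.1) 0 = 0 := h1.mpr hseen
        have hstep : stepA (acc, d) h =
            (acc ++ [h], d.insert (PySem.Str.lower h.1) (d.getD (PySem.Str.lower h.1) 0 + 1)) := by
          simp only [stepA, if_pos hsA, PySem.Dict.getD_insert]
          simp [hz]
        rw [hstep, ih _ _ (PySem.Str.lower h.1 :: seen) ?_, pruneAux,
          if_neg (fun hx => hseen hx.2), List.append_assoc, List.singleton_append]
        intro t htB
        obtain ⟨g0, g1⟩ := hinv t htB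
        rw [PySem.Dict.getD_insert]
        split_ifs with he
        · subst he
          refine ⟨by omega, by constructor <;> intro hx <;> simp_all⟩
        · refine ⟨g0, ?_⟩
          rw [g1]
          simp [List.mem_cons, he]
    · have hsA : PySem.Str.lower h.1 ∉ pvSpecialA := fun hx => hs ((mem_specialAB _).mp hx)
      have hstep : stepA (acc, d) h = (acc ++ [h], d) := by
        simp only [stepA, if_neg hsA]
      rw [hstep, ih _ _ (PySem.Str.lower h.1 :: seen) ?_, pruneAux,
        if_neg (fun hx => hs hx.1), List.append_assoc, List.singleton_append]
      intro t htB
      obtain ⟨g0, g1⟩ := hinv t htB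
      have hne : t ≠ PySem.Str.lower h.1 := fun he => hs (he ▸ htB)
      refine ⟨g0, ?_⟩
      rw [g1]
      simp [List.mem_cons, hne]

theorem A_eq (xs : List (String × String)) :
    prune_headers_py xs = pruneAux xs.reverse [] := by
  rw [A_eq_foldr, A_fold xs.reverse [] PySem.Dict.empty []]
  · simp
  · intro t _; simp [PySem.Dict.getD_empty]

-- B's first pass
def lastDict (xs : List (String × String)) : PySem.Dict String Int :=
  (PySem.List.enumerate xs 0).foldl
    (fun d p => if PySem.Str.lower p.2.1 ∈ pvSpecialB then d.insert (PySem.Str.lower p.2.1) p.1 else d)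
    PySem.Dict.empty

theorem lastDict_append (ys : List (String × String)) (h : String × String) :
    lastDict (ys ++ [h]) =
      if PySem.Str.lower h.1 ∈ pvSpecialB then (lastDict ys).insert (PySem.Str.lower h.1) (ys.length : Int)
      else lastDict ys := by
  unfold lastDict
  rw [PySem.List.enumerate_append, List.foldl_append, PySem.List.enumerate_cons,
    PySem.List.enumerate_nil]
  simp

theorem lastDict_lt (xs : List (String × String)) (t : String) :
    (lastDict xs).getD t (-1) < (xs.length : Int) := by
  induction xs using List.reverseRecOn with
  | nil => simp [lastDict, PySem.List.enumerate_nil, PySem.Dict.getD_empty]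
  | append_singleton ys h ih =>
    rw [lastDict_append]
    split_ifs with hsp
    · rw [PySem.Dict.getD_insert]
      split_ifs with he
      · simp
      · simp; omega
    · simp; omega

theorem lastDict_ge (xs : List (String × String)) (t : String) (ht : t ∈ pvSpecialB) :
    ∀ (j : ℕ) (hj : j < xs.length), PySem.Str.lower xs[j].1 = t →
    (j : Int) ≤ (lastDict xs).getD t (-1) := by
  induction xs using List.reverseRecOn with
  | nil => intro j hj; simp at hj
  | append_singleton ys h ih =>
    intro j hj he
    rw [lastDict_append]
    rcases Nat.lt_or_ge j ys.length with hlt | hge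
    · have hx : (ys ++ [h])[j] = ys[j] := List.getElem_append_left hlt
      rw [hx] at he
      have hy := ih j hlt he
      split_ifs with hsp
      · rw [PySem.Dict.getD_insert]
        split_ifs with he2
        · exact_mod_cast Nat.le_of_lt hlt
        · exact hy
      · exact hy
    · have hje : j = ys.length := by
        simp only [List.length_append, List.length_singleton] at hj; omega
      subst hje
      have hx : (ys ++ [h])[ys.length] = h := by
        rw [List.getElem_append_right (Nat.le_refl _)]
        simp
      rw [hx] at he
      have hsp : PySem.Str.lower h.1 ∈ pvSpecialB := he ▸ ht
      rw [if_pos hsp, PySem.Dict.getD_insert, if_pos he.symm]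

theorem lastDict_at (xs : List (String × String)) (t : String) :
    ∀ (j : ℕ) (hj : j < xs.length), (lastDict xs).getD t (-1) = (j : Int) →
    PySem.Str.lower xs[j].1 = t := by
  induction xs using List.reverseRecOn with
  | nil => intro j hj; simp at hj
  | append_singleton ys h ih =>
    intro j hj he
    rw [lastDict_append] at he
    have hlow : ∀ (hjy : j < ys.length), (lastDict ys).getD t (-1) = (j : Int) →
        PySem.Str.lower (ys ++ [h])[j].1 = t := by
      intro hjy he2
      have hx : (ys ++ [h])[j] = ys[j] := List.getElem_append_left hjy
      rw [hx]
      exact ih j hjy he2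
    have hybound := lastDict_lt ys t
    split_ifs at he with hsp
    · rw [PySem.Dict.getD_insert] at he
      split_ifs at he with he2
      · have hje : j = ys.length := by exact_mod_cast he.symm
        subst hje
        have hx : (ys ++ [h])[ys.length] = h := by
          rw [List.getElem_append_right (Nat.le_refl _)]
          simp
        rw [hx]
        exact he2.symm
      · have hjy : j < ys.length := by rw [he] at hybound; exact_mod_cast hybound
        exact hlow hjy he
    · have hjy : j < ys.length := by rw [he] at hybound; exact_mod_cast hybound
      exact hlow hjy he

theorem B_fold (xs : List (String × String)) : ∀ (m : ℕ), m ≤ xs.length → ∀ acc seen,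
    (∀ t ∈ pvSpecialB, (t ∈ seen ↔ (m : Int) ≤ (lastDict xs).getD t (-1))) →
    (((List.range m).map (fun k : ℕ => ((m : ℕ) : Int) - 1 - k)).foldl
      (fun acc i =>
        if PySem.Str.lower (PySem.List.pyGetD xs i ("", "")).1 ∉ pvSpecialB ∨
            (lastDict xs).getD (PySem.Str.lower (PySem.List.pyGetD xs i ("", "")).1) (-1) = i
        then acc ++ [PySem.List.pyGetD xs i ("", "")] else acc) acc)
      = acc ++ pruneAux ((xs.take m).reverse) seen := by
  intro m
  induction m with
  | zero => intro _ acc seen _; simp [pruneAux]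
  | succ m ih =>
    intro hm acc seen hseen
    have hmlt : m < xs.length := hm
    have hxm : PySem.List.pyGetD xs ((m : ℕ) : Int) ("", "") = xs[m] := by
      rw [PySem.List.pyGetD_natCast, List.getD_eq_getElem _ _ hmlt]
    have htake : (xs.take (m + 1)).reverse = xs[m] :: (xs.take m).reverse := by
      rw [List.take_add_one, List.getElem?_eq_getElem hmlt]
      simp
    have key : ∀ t' ∈ pvSpecialB, t' ≠ PySem.Str.lower xs[m].1 →
        (t' ∈ seen ↔ (m : Int) ≤ (lastDict xs).getD t' (-1)) := by
      intro t' ht' hne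
      rw [hseen t' ht']
      have hnm : (lastDict xs).getD t' (-1) ≠ (m : Int) :=
        fun hx => hne (lastDict_at xs t' m hmlt hx).symm
      constructor <;> intro hx
      · push_cast at hx ⊢; omega
      · push_cast at hx ⊢
        rcases lt_or_eq_of_le hx with h2 | h2
        · omega
        · exact absurd h2.symm hnm
    rw [desc_map_succ, List.foldl_cons, htake]
    simp only [hxm]
    by_cases hs : PySem.Str.lower xs[m].1 ∈ pvSpecialB
    · have hge : (m : Int) ≤ (lastDict xs).getD (PySem.Str.lower xs[m].1) (-1) :=
        lastDict_ge xs _ hs m hmlt rfl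
      by_cases hseen' : PySem.Str.lower xs[m].1 ∈ seen
      · -- the type occurs later: this is not the last occurrence, both drop it
        have hgt : ((m : ℕ) : Int) + 1 ≤ (lastDict xs).getD (PySem.Str.lower xs[m].1) (-1) := by
          have := (hseen _ hs).mp hseen'
          push_cast at this ⊢; omega
        rw [if_neg (fun hx => hx.elim (fun h1 => h1 hs) (fun h2 => by omega)), pruneAux,
          if_pos ⟨hs, hseen'⟩]
        refine ih (Nat.le_of_lt hmlt) acc seen ?_
        intro t' ht'
        by_cases hne : t' = PySem.Str.lower xs[m].1
        · subst hne
          simp [hseen', hge]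
        · exact key t' ht' hne
      · -- last occurrence of a special type: both keep it
        have hlt2 : ¬ ((m : ℕ) : Int) + 1 ≤ (lastDict xs).getD (PySem.Str.lower xs[m].1) (-1) := by
          intro hx
          exact hseen' ((hseen _ hs).mpr (by push_cast at hx ⊢; omega))
        have heq : (lastDict xs).getD (PySem.Str.lower xs[m].1) (-1) = ((m : ℕ) : Int) := by omega
        rw [if_pos (Or.inr heq), pruneAux, if_neg (fun hx => hseen' hx.2),
          ih (Nat.le_of_lt hmlt) (acc ++ [xs[m]]) (PySem.Str.lower xs[m].1 :: seen) ?_,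
          List.append_assoc, List.singleton_append]
        intro t' ht'
        by_cases hne : t' = PySem.Str.lower xs[m].1
        · subst hne
          simp [hge]
        · rw [List.mem_cons]
          simp only [hne, false_or]
          exact key t' ht' hne
    · -- non-special: both keep it
      rw [if_pos (Or.inl hs), pruneAux, if_neg (fun hx => hs hx.1),
        ih (Nat.le_of_lt hmlt) (acc ++ [xs[m]]) (PySem.Str.lower xs[m].1 :: seen) ?_,
        List.append_assoc, List.singleton_append]
      intro t' ht'
      have hne : t' ≠ PySem.Str.lower xs[m].1 := fun hx => hs (hx ▸ ht')
      rw [List.mem_cons]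
      simp only [hne, false_or]
      exact key t' ht' hne

theorem B_eq (xs : List (String × String)) :
    prune_headers_py_alt xs = pruneAux xs.reverse [] := by
  have h0 : prune_headers_py_alt xs =
      (PySem.List.pyRange ((xs.length : Int) - 1) (-1) (-1)).foldl
        (fun acc i =>
          if PySem.Str.lower (PySem.List.pyGetD xs i ("", "")).1 ∉ pvSpecialB ∨
              (lastDict xs).getD (PySem.Str.lower (PySem.List.pyGetD xs i ("", "")).1) (-1) = i
          then acc ++ [PySem.List.pyGetD xs i ("", "")] else acc) [] := rfl
  have hn : (((xs.length : Int) - 1) - (-1)).toNat = xs.length := by omega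
  have hr : PySem.List.pyRange ((xs.length : Int) - 1) (-1) (-1)
      = (List.range xs.length).map (fun k : ℕ => ((xs.length : ℕ) : Int) - 1 - k) := by
    rw [PySem.List.pyRange_neg_one, hn]
  rw [h0, hr, B_fold xs xs.length le_rfl [] [] ?_, List.take_length, List.nil_append]
  intro t ht
  simp only [List.not_mem_nil, false_iff]
  exact fun hx => absurd (lastDict_lt xs t) (by omega)

-- ===== VERDICT (by name: the statement is the Claim_ definition above) =====
theorem prune_headers_py_spec : Claim_equal_prune_headers_py := by
  intro headers _
  unfold Spec_prune_headers_py
  rw [A_eq, B_eq]
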